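-- pv_equiv track=rewrite | github.com/MrBrantCode/unitest_baseline | mut_generate/mist_train_cf/cf_97021/solution.py | find_second_occurrence
-- ===== SOURCE A (Python) =====
-- def find_second_occurrence(string, substring):
--     if not string or not substring:
--         return -1
--
--     length = len(string)
--     sub_length = len(substring)
--     count = 0
--     i = 0
--
--     while i < length:
--         if string[i:i+sub_length] == substring:
--             count += 1
--             if count == 2:
--                 return i
--             i += sub_length
--         else:
--             i += 1
--
--     return -1
-- ===== SOURCE B (Python) =====
-- def find_second_occurrence(string, substring):
--     if not string or not substring:
--         return -1
--     first = string.find(substring)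
--     if first == -1:
--         return -1
--     return string.find(substring, first + len(substring))
-- ===== Notes on version B (the rewrite author's own statement) =====
-- stated objective: idiomatic
-- what changed: Replaces the hand-written character-scanning while loop with two calls to str.find: find the first occurrence, then find again starting just past it (non-overlapping), returning that index or -1.
import Mathlib
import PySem

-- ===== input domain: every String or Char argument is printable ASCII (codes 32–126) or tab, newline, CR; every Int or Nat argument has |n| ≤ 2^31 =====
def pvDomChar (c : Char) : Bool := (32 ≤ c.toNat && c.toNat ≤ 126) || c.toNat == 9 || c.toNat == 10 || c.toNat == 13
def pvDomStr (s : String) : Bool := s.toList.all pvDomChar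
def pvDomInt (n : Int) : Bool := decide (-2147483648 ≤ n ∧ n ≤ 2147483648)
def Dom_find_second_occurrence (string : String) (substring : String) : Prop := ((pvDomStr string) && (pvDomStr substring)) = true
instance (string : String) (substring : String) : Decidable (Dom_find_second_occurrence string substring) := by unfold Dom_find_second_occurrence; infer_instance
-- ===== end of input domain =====

-- B replaces A's hand-written character-scanning while loop with two str.find calls
-- (first occurrence, then search again just past it); return value is identical.

-- ===== PORT A =====
-- the while loop of A: i is the scan position, count the matches seen so far
def fsoLoop (s sub : List Char) (m : Nat) (hm : 0 < m) (i : Nat) (count : Nat) : Int :=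
  if _h : i < s.length then
    if PySem.List.slice s (some (i : Int)) (some ((i : Int) + (m : Int))) = sub then
      if count + 1 = 2 then (i : Int)
      else fsoLoop s sub m hm (i + m) (count + 1)
    else fsoLoop s sub m hm (i + 1) count
  else -1
termination_by s.length - i
decreasing_by all_goals omega

def find_second_occurrence (string : String) (substring : String) : Int :=
  if h : string.toList = [] ∨ substring.toList = [] then -1
  else
    fsoLoop string.toList substring.toList substring.toList.length
      (List.length_pos_of_ne_nil (not_or.mp h).2) 0 0

-- ===== PORT B =====
def find_second_occurrence_alt (string : String) (substring : String) : Int :=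
  if string.toList = [] ∨ substring.toList = [] then -1
  else
    let first := PySem.Str.find string substring
    if first = -1 then -1
    else PySem.Str.findFrom string substring (first + PySem.Str.len substring) none

-- ===== PRECONDITION & SPEC =====
def Spec_find_second_occurrence (string : String) (substring : String) (out : Int) : Prop := out = find_second_occurrence_alt string substring
instance (string : String) (substring : String) (out : Int) : Decidable (Spec_find_second_occurrence string substring out) := by unfold Spec_find_second_occurrence; infer_instance

-- ===== CLAIM (what is proved, stated in full; the proofs are below) =====
def Claim_equal_find_second_occurrence : Prop := ∀ (string : String) (substring : String), Dom_find_second_occurrence string substring → Spec_find_second_occurrence string substring (find_second_occurrence string substring)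

-- ===== LEMMAS AND PROOFS =====

-- sub occurs in s at a position ≥ j iff it is an infix of s.drop j
lemma infix_drop_iff (s sub : List Char) (j : Nat) :
    sub <:+: s.drop j ↔ ∃ i : Nat, sub <+: s.drop (j + i) := by
  rw [← PySem.Chars.isIn_iff_infix, ← PySem.Chars.exists_prefix_drop_iff_isIn]
  apply exists_congr
  intro i
  rw [List.drop_drop]

-- stepping past a non-match does not change the result of find-from
lemma findFrom_step (s sub : List Char) (j : Nat) (hj : j < s.length)
    (hnm : ¬ sub <+: s.drop j) :
    PySem.Chars.findFrom s sub (j : Int) none = PySem.Chars.findFrom s sub ((j + 1 : Nat) : Int) none := by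
  have hj0 : j ≤ s.length := le_of_lt hj
  have hj1 : j + 1 ≤ s.length := hj
  by_cases h2 : PySem.Chars.findFrom s sub ((j + 1 : Nat) : Int) none = -1
  · rw [h2, PySem.Chars.findFrom_natCast_eq_neg_one_iff s sub j hj0]
    rw [PySem.Chars.findFrom_natCast_eq_neg_one_iff s sub (j+1) hj1] at h2
    rw [infix_drop_iff]
    rintro ⟨i, hi⟩
    rcases i with _ | k
    · exact hnm hi
    · exact h2 ((infix_drop_iff s sub (j+1)).mpr ⟨k, by rwa [show j + 1 + k = j + (k + 1) by omega]⟩)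
  · obtain ⟨h1le, h1pre, h1min⟩ := PySem.Chars.findFrom_natCast_spec s sub (j+1) hj1 h2
    set r := PySem.Chars.findFrom s sub ((j + 1 : Nat) : Int) none with hr
    have hrn : ((j:Int)+1) ≤ r := by exact_mod_cast h1le
    have h0ne : PySem.Chars.findFrom s sub (j : Int) none ≠ -1 := by
      simp only [Ne, PySem.Chars.findFrom_natCast_eq_neg_one_iff s sub j hj0, not_not,
        infix_drop_iff]
      exact ⟨r.toNat - j, by rwa [show j + (r.toNat - j) = r.toNat by omega]⟩
    obtain ⟨h0le, h0pre, h0min⟩ := PySem.Chars.findFrom_natCast_spec s sub j hj0 h0ne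
    set r0 := PySem.Chars.findFrom s sub (j : Int) none with hr0
    have h0n : (j:Int) ≤ r0 := by exact_mod_cast h0le
    have hne : r0.toNat ≠ j := fun h => hnm (h ▸ h0pre)
    have hge : j + 1 ≤ r0.toNat := by omega
    have e : r0.toNat = r.toNat := by
      rcases lt_trichotomy r0.toNat r.toNat with h | h | h
      · exact absurd h0pre (h1min r0.toNat hge h)
      · exact h
      · exact absurd h1pre (h0min r.toNat (by omega) h)
    omega

-- a match at j means find-from j returns j
lemma findFrom_self (s sub : List Char) (j : Nat) (hj : j ≤ s.length)
    (hm : sub <+: s.drop j) :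
    PySem.Chars.findFrom s sub (j : Int) none = (j : Int) := by
  have hne : PySem.Chars.findFrom s sub (j : Int) none ≠ -1 := by
    simp only [Ne, PySem.Chars.findFrom_natCast_eq_neg_one_iff s sub j hj, not_not]
    exact hm.isInfix
  obtain ⟨hle, hpre, hmin⟩ := PySem.Chars.findFrom_natCast_spec s sub j hj hne
  set r := PySem.Chars.findFrom s sub (j : Int) none with hr
  have hjr : (j:Int) ≤ r := by exact_mod_cast hle
  have : ¬ j < r.toNat := fun h => (hmin j le_rfl h) hm
  omega

-- past the end (or at the end), find-from of a nonempty pattern is -1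
lemma findFrom_end (s sub : List Char) (hm : 0 < sub.length) :
    PySem.Chars.findFrom s sub (s.length : Int) none = -1 := by
  rw [PySem.Chars.findFrom_natCast_eq_neg_one_iff s sub s.length le_rfl]
  rw [List.drop_length]
  intro h
  rw [List.infix_nil] at h
  simp [h] at hm

-- slice equality in the loop is exactly "sub is a prefix of s.drop i"
lemma slice_test (s sub : List Char) (i : Nat) :
    (PySem.List.slice s (some (i : Int)) (some ((i : Int) + (sub.length : Int))) = sub)
      ↔ sub <+: s.drop i := by
  rw [PySem.List.slice_natCast_add]
  constructor
  · intro h; exact h ▸ List.take_prefix _ _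
  · intro h; exact ((List.prefix_iff_eq_take.mp h)).symm

-- the count = 1 phase of A's loop is exactly find-from
lemma loop_one (s sub : List Char) (hm : 0 < sub.length) :
    ∀ j, j ≤ s.length →
      fsoLoop s sub sub.length hm j 1 = PySem.Chars.findFrom s sub (j : Int) none := by
  suffices H : ∀ n j, j ≤ s.length → s.length - j ≤ n →
      fsoLoop s sub sub.length hm j 1 = PySem.Chars.findFrom s sub (j : Int) none from
    fun j hj => H s.length j hj (by omega)
  intro n
  induction n with
  | zero =>
    intro j hj hle
    have : j = s.length := by omega
    subst this
    rw [fsoLoop, dif_neg (by omega), findFrom_end s sub hm]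
  | succ n ih =>
    intro j hj hle
    rw [fsoLoop]
    by_cases hlt : j < s.length
    · rw [dif_pos hlt]
      by_cases hsl : PySem.List.slice s (some (j : Int)) (some ((j : Int) + (sub.length : Int))) = sub
      · rw [if_pos hsl, if_pos rfl, findFrom_self s sub j hj ((slice_test s sub j).mp hsl)]
      · rw [if_neg hsl, ih (j+1) hlt (by omega),
            ← findFrom_step s sub j hlt (fun h => hsl ((slice_test s sub j).mpr h))]
    · rw [dif_neg hlt]
      have : j = s.length := by omega
      subst this
      rw [findFrom_end s sub hm]

-- the count = 0 phase: find the first match, then run the count = 1 phase past it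
lemma loop_zero (s sub : List Char) (hm : 0 < sub.length) :
    ∀ j, j ≤ s.length →
      fsoLoop s sub sub.length hm j 0 =
        (let f := PySem.Chars.findFrom s sub (j : Int) none
         if f = -1 then -1 else fsoLoop s sub sub.length hm (f.toNat + sub.length) 1) := by
  suffices H : ∀ n j, j ≤ s.length → s.length - j ≤ n →
      fsoLoop s sub sub.length hm j 0 =
        (let f := PySem.Chars.findFrom s sub (j : Int) none
         if f = -1 then -1 else fsoLoop s sub sub.length hm (f.toNat + sub.length) 1) from
    fun j hj => H s.length j hj (by omega)
  intro n
  induction n with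
  | zero =>
    intro j hj hle
    have : j = s.length := by omega
    subst this
    rw [fsoLoop, dif_neg (by omega)]
    simp [findFrom_end s sub hm]
  | succ n ih =>
    intro j hj hle
    rw [fsoLoop]
    by_cases hlt : j < s.length
    · rw [dif_pos hlt]
      by_cases hsl : PySem.List.slice s (some (j : Int)) (some ((j : Int) + (sub.length : Int))) = sub
      · rw [if_pos hsl, if_neg (by omega)]
        have hpre := (slice_test s sub j).mp hsl
        have hself := findFrom_self s sub j (le_of_lt hlt) hpre
        simp only [hself]
        rw [if_neg (by omega), Int.toNat_natCast]
      · rw [if_neg hsl, ih (j+1) hlt (by omega),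
            ← findFrom_step s sub j hlt (fun h => hsl ((slice_test s sub j).mpr h))]
    · rw [dif_neg hlt]
      have : j = s.length := by omega
      subst this
      simp [findFrom_end s sub hm]

-- ===== VERDICT (by name: the statement is the Claim_ definition above) =====
theorem find_second_occurrence_spec : Claim_equal_find_second_occurrence := by
  intro string substring _
  unfold Spec_find_second_occurrence find_second_occurrence find_second_occurrence_alt
  by_cases h : string.toList = [] ∨ substring.toList = []
  · rw [dif_pos h, if_pos h]
  · rw [dif_neg h, if_neg h]
    have hm : 0 < substring.toList.length := List.length_pos_of_ne_nil (not_or.mp h).2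
    have hz := loop_zero string.toList substring.toList hm 0 (Nat.zero_le _)
    simp only [Nat.cast_zero, PySem.Chars.findFrom_zero] at hz
    rw [hz]
    simp only [PySem.Str.find_eq, PySem.Str.len_eq]
    by_cases hf : PySem.Chars.find string.toList substring.toList = -1
    · rw [if_pos hf, if_pos hf]
    · rw [if_neg hf, if_neg hf]
      have hnn : 0 ≤ PySem.Chars.find string.toList substring.toList :=
        (PySem.Chars.find_nonneg_iff _ _).mpr ((PySem.Chars.find_ne_neg_one_iff _ _).mp hf)
      obtain ⟨hpre, -⟩ := PySem.Chars.find_spec hnn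
      have hlen : (PySem.Chars.find string.toList substring.toList).toNat
          + substring.toList.length ≤ string.toList.length := by
        have h1 := hpre.length_le
        rw [List.length_drop] at h1
        have h2 := PySem.Chars.find_le_length string.toList substring.toList
        omega
      rw [loop_one string.toList substring.toList hm _ hlen]
      rw [PySem.Str.findFrom_eq]
      congr 1
      push_cast
      omega
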